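-- pv_equiv track=rewrite | github.com/GeruniaSun/ITMO-algs-codeforces | ex_3_D.py | solve
-- ===== SOURCE A (Python) =====
-- def delete_common(a, b):
--     count_b = {}
--     for x in b: count_b[x] = count_b.get(x, 0) + 1
--
--     new_a = []
--     for x in a:
--         if count_b.get(x, 0) > 0:
--             count_b[x] -= 1
--         else:
--             new_a.append(x)
--
--     new_b = []
--     for x, cnt in count_b.items():
--         new_b.extend([x] * cnt)
--
--     return new_a, new_b
--
-- def replace_multidigit(arr):
--     res = []
--     cnt = 0
--
--     for x in arr:
--         if x > 9:
--             res.append(len(str(x)))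
--             cnt += 1
--         else:
--             res.append(x)
--
--     return res, cnt
--
-- def solve(a, b):
--     a, b = delete_common(a, b)
--
--     a, count_a = replace_multidigit(a)
--     b, count_b = replace_multidigit(b)
--     ans = count_a + count_b
--
--     a, b = delete_common(a, b)
--     ans += sum(1 for x in (a + b) if x != 1)
--
--     return ans
-- ===== SOURCE B (Python) =====
-- # B: delete_common re-done as sort + two-pointer merge (multiset difference);
-- # replace/count steps as comprehensions. Same answer: the result only counts
-- # residual elements, so leftover order never matters.
--
-- def _merge_diff(a, b):
--     sa, sb = sorted(a), sorted(b)
--     i = j = 0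
--     ra, rb = [], []
--     while i < len(sa) and j < len(sb):
--         if sa[i] == sb[j]:
--             i += 1
--             j += 1
--         elif sa[i] < sb[j]:
--             ra.append(sa[i])
--             i += 1
--         else:
--             rb.append(sb[j])
--             j += 1
--     ra.extend(sa[i:])
--     rb.extend(sb[j:])
--     return ra, rb
--
-- def solve(a, b):
--     a1, b1 = _merge_diff(a, b)
--     a2 = [len(str(x)) if x > 9 else x for x in a1]
--     b2 = [len(str(x)) if x > 9 else x for x in b1]
--     ans = sum(x > 9 for x in a1) + sum(x > 9 for x in b1)
--     a3, b3 = _merge_diff(a2, b2)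
--     return ans + sum(x != 1 for x in a3) + sum(x != 1 for x in b3)
-- ===== Notes on version B (the rewrite author's own statement) =====
-- stated objective: alternative
-- what changed: delete_common's dict-counting multiset subtraction is replaced by sorting both lists and a two-pointer merge that drops equal elements, and the replace/count steps become comprehensions; the final count is order-insensitive, so the answer is unchanged.
import Mathlib
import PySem

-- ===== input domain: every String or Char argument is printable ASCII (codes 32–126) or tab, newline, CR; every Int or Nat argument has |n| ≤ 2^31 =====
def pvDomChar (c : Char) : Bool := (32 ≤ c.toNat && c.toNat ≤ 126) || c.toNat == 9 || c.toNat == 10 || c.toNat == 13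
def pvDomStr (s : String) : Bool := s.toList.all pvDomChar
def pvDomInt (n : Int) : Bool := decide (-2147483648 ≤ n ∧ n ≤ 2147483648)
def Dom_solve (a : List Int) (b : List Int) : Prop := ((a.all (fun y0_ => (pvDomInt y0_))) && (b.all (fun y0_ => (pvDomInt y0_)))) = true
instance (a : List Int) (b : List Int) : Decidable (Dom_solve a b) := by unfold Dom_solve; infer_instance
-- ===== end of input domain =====

-- B replaces delete_common's dict-based multiset subtraction by sort + two-pointer merge
-- (alternative decomposition, same answer: the result only counts leftovers, so order is immaterial).

-- ===== PORT A =====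
-- delete_common: Counter-style dict of b, decrement while scanning a, rebuild leftovers of b from the dict.
def pvDeleteCommon (a : List Int) (b : List Int) : List Int × List Int :=
  let countB := b.foldl (fun d x => d.insert x (d.getD x 0 + 1)) PySem.Dict.empty
  let s := a.foldl (fun (s : PySem.Dict Int Int × List Int) x =>
      if s.1.getD x 0 > 0 then (s.1.insert x (s.1.getD x 0 - 1), s.2)
      else (s.1, s.2 ++ [x])) (countB, ([] : List Int))
  let newB := s.1.items.foldl (fun acc p => acc ++ List.replicate p.2.toNat p.1) ([] : List Int)
  (s.2, newB)

def pvReplaceMultidigit (arr : List Int) : List Int × Int :=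
  arr.foldl (fun (s : List Int × Int) x =>
    if x > 9 then (s.1 ++ [((PySem.Int.toChars x).length : Int)], s.2 + 1)
    else (s.1 ++ [x], s.2)) (([] : List Int), (0 : Int))

def solve (a : List Int) (b : List Int) : Int :=
  let p := pvDeleteCommon a b
  let ra := pvReplaceMultidigit p.1
  let rb := pvReplaceMultidigit p.2
  let ans := ra.2 + rb.2
  let q := pvDeleteCommon ra.1 rb.1
  ans + ((q.1 ++ q.2).foldl (fun acc x => if x != 1 then acc + 1 else acc) (0 : Int))

-- ===== PORT B =====
-- the two-pointer merge of Source B, written as structural recursion (inner loop = advance in b while sa[i] > sb[j])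
def pvMergeDiffInner (f : List Int → List Int × List Int) (x : Int) (rest : List Int) : List Int → List Int × List Int
  | [] => (x :: rest, [])
  | y :: b =>
      if x == y then f b
      else if x < y then
        let r := f (y :: b)
        (x :: r.1, r.2)
      else
        let r := pvMergeDiffInner f x rest b
        (r.1, y :: r.2)

def pvMergeDiff : List Int → List Int → List Int × List Int
  | [], b => ([], b)
  | x :: a, b => pvMergeDiffInner (pvMergeDiff a) x a b

def solve_alt (a : List Int) (b : List Int) : Int :=
  let p := pvMergeDiff (PySem.List.sorted a (fun x => x) false) (PySem.List.sorted b (fun x => x) false)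
  let a2 := p.1.map (fun x => if x > 9 then ((PySem.Int.toChars x).length : Int) else x)
  let b2 := p.2.map (fun x => if x > 9 then ((PySem.Int.toChars x).length : Int) else x)
  let ans : Int := (p.1.countP (fun x => decide (x > 9)) : Nat) + (p.2.countP (fun x => decide (x > 9)) : Nat)
  let q := pvMergeDiff (PySem.List.sorted a2 (fun x => x) false) (PySem.List.sorted b2 (fun x => x) false)
  ans + (q.1.countP (fun x => x != 1) : Nat) + (q.2.countP (fun x => x != 1) : Nat)

-- ===== PRECONDITION & SPEC =====
def Spec_solve (a : List Int) (b : List Int) (out : Int) : Prop := out = solve_alt a b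
instance (a : List Int) (b : List Int) (out : Int) : Decidable (Spec_solve a b out) := by unfold Spec_solve; infer_instance

-- ===== CLAIM (what is proved, stated in full; the proofs are below) =====
def Claim_equal_solve : Prop := ∀ (a : List Int) (b : List Int), Dom_solve a b → Spec_solve a b (solve a b)

-- ===== LEMMAS AND PROOFS =====

-- B-side: on sorted inputs the two-pointer merge computes the per-value multiset differences.
theorem pvInner_count (v x : Int) (a : List Int)
    (iha : ∀ b : List Int, b.Pairwise (· ≤ ·) →
      (pvMergeDiff a b).1.count v = a.count v - min (a.count v) (b.count v) ∧
      (pvMergeDiff a b).2.count v = b.count v - min (a.count v) (b.count v))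
    (hxa : ∀ z ∈ a, x ≤ z) :
    ∀ b : List Int, b.Pairwise (· ≤ ·) →
      (pvMergeDiffInner (pvMergeDiff a) x a b).1.count v
        = (x :: a).count v - min ((x :: a).count v) (b.count v) ∧
      (pvMergeDiffInner (pvMergeDiff a) x a b).2.count v
        = b.count v - min ((x :: a).count v) (b.count v) := by
  intro b
  induction b with
  | nil => intro _; constructor <;> simp [pvMergeDiffInner]
  | cons y b ihb =>
      intro hb
      have hyb : ∀ z ∈ b, y ≤ z := fun z hz => (List.pairwise_cons.1 hb).1 z hz
      have hb' : b.Pairwise (· ≤ ·) := (List.pairwise_cons.1 hb).2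
      rcases lt_trichotomy x y with hlt | heq | hgt
      · have hbeq : (x == y) = false := by simp; omega
        obtain ⟨h1, h2⟩ := iha (y :: b) hb
        simp only [pvMergeDiffInner, hbeq, Bool.false_eq_true, if_false, if_pos hlt]
        by_cases hv : x = v
        · have h0 : (y :: b).count v = 0 := by
            rw [List.count_eq_zero]
            intro hm
            rcases List.mem_cons.1 hm with h | h
            · omega
            · have := hyb v h; omega
          simp only [List.count_cons, h0] at h1 h2 ⊢
          simp [hv] at h1 h2 ⊢
          omega
        · simp only [List.count_cons] at h1 h2 ⊢
          simp [hv] at h1 h2 ⊢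
          omega
      · subst heq
        obtain ⟨h1, h2⟩ := iha b hb'
        simp only [pvMergeDiffInner, BEq.rfl, if_true]
        simp only [List.count_cons] at h1 h2 ⊢
        by_cases hv : x = v <;> simp [hv] at h1 h2 ⊢ <;> omega
      · have hbeq : (x == y) = false := by simp; omega
        have hnlt : ¬ (x < y) := by omega
        obtain ⟨h1, h2⟩ := ihb hb'
        simp only [pvMergeDiffInner, hbeq, Bool.false_eq_true, if_false, if_neg hnlt]
        by_cases hv : y = v
        · have h0 : (x :: a).count v = 0 := by
            rw [List.count_eq_zero]
            intro hm
            rcases List.mem_cons.1 hm with h | h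
            · omega
            · have := hxa v h; omega
          simp only [List.count_cons, h0] at h1 h2 ⊢
          simp [hv] at h1 h2 ⊢
          omega
        · simp only [List.count_cons] at h1 h2 ⊢
          simp [hv] at h1 h2 ⊢
          omega

theorem pvMergeDiff_count (v : Int) : ∀ (a b : List Int), a.Pairwise (· ≤ ·) → b.Pairwise (· ≤ ·) →
    (pvMergeDiff a b).1.count v = a.count v - min (a.count v) (b.count v) ∧
    (pvMergeDiff a b).2.count v = b.count v - min (a.count v) (b.count v) := by
  intro a
  induction a with
  | nil => intro b _ _; simp [pvMergeDiff]
  | cons x a iha =>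
      intro b ha hb
      have hxa : ∀ z ∈ a, x ≤ z := fun z hz => (List.pairwise_cons.1 ha).1 z hz
      have ha' : a.Pairwise (· ≤ ·) := (List.pairwise_cons.1 ha).2
      exact pvInner_count v x a (fun b hb => iha b ha' hb) hxa b hb

-- A-side: invariant of the decrement loop over a.
theorem pvLoopA (v : Int) : ∀ (a : List Int) (d : PySem.Dict Int Int) (acc : List Int),
    (∀ w, 0 ≤ d.getD w 0) →
    (a.foldl (fun (s : PySem.Dict Int Int × List Int) x =>
        if s.1.getD x 0 > 0 then (s.1.insert x (s.1.getD x 0 - 1), s.2)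
        else (s.1, s.2 ++ [x])) (d, acc)).1.getD v 0
      = d.getD v 0 - ((min (a.count v) (d.getD v 0).toNat : Nat) : Int) ∧
    (a.foldl (fun (s : PySem.Dict Int Int × List Int) x =>
        if s.1.getD x 0 > 0 then (s.1.insert x (s.1.getD x 0 - 1), s.2)
        else (s.1, s.2 ++ [x])) (d, acc)).2.count v
      = acc.count v + (a.count v - min (a.count v) (d.getD v 0).toNat) ∧
    (∀ w, 0 ≤ (a.foldl (fun (s : PySem.Dict Int Int × List Int) x =>
        if s.1.getD x 0 > 0 then (s.1.insert x (s.1.getD x 0 - 1), s.2)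
        else (s.1, s.2 ++ [x])) (d, acc)).1.getD w 0) ∧
    (a.foldl (fun (s : PySem.Dict Int Int × List Int) x =>
        if s.1.getD x 0 > 0 then (s.1.insert x (s.1.getD x 0 - 1), s.2)
        else (s.1, s.2 ++ [x])) (d, acc)).1.keys = d.keys := by
  intro a
  induction a with
  | nil => intro d acc h0; refine ⟨by simp, by simp, h0, rfl⟩
  | cons x a ih =>
      intro d acc h0
      simp only [List.foldl_cons]
      by_cases hx : d.getD x 0 > 0
      · simp only [if_pos hx]
        have hc : d.contains x = true := by
          by_contra hc
          have := PySem.Dict.getD_of_not_contains d (0 : Int) (k := x) (by simpa using hc)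
          omega
        have h0' : ∀ w, 0 ≤ (d.insert x (d.getD x 0 - 1)).getD w 0 := by
          intro w
          rw [PySem.Dict.getD_insert]
          split_ifs with hw
          · have := h0 x; omega
          · exact h0 w
        obtain ⟨h1, h2, h3, h4⟩ := ih (d.insert x (d.getD x 0 - 1)) acc h0'
        rw [PySem.Dict.getD_insert] at h1 h2
        refine ⟨?_, ?_, h3, by rw [h4]; exact PySem.Dict.keys_insert_of_contains d _ hc⟩
        · by_cases hv : v = x
          · subst hv
            have := h0 v
            simp at h1 h2 ⊢
            omega
          · simp [Ne.symm hv] at h1 h2 ⊢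
            omega
        · by_cases hv : v = x
          · subst hv
            have := h0 v
            simp at h1 h2 ⊢
            omega
          · simp [Ne.symm hv] at h1 h2 ⊢
            omega
      · simp only [if_neg hx]
        obtain ⟨h1, h2, h3, h4⟩ := ih d (acc ++ [x]) h0
        have hz : d.getD x 0 = 0 := by have := h0 x; omega
        refine ⟨?_, ?_, h3, h4⟩
        · by_cases hv : v = x
          · subst hv
            simp [hz] at h1 h2 ⊢
            omega
          · simp [Ne.symm hv] at h1 h2 ⊢
            omega
        · by_cases hv : v = x
          · subst hv
            simp [List.count_append, hz] at h1 h2 ⊢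
            omega
          · simp [List.count_append, Ne.symm hv] at h1 h2 ⊢
            omega

-- rebuilding the leftover list from the final dict: each value occurs getD-many times
theorem pvFlatCount : ∀ (l : List (Int × Int)) (v : Int), (l.map Prod.fst).Nodup →
    (l.flatMap (fun p => List.replicate p.2.toNat p.1)).count v
      = ((PySem.Dict.mk l).getD v 0).toNat := by
  intro l
  induction l with
  | nil => intro v _; rfl
  | cons p l ih =>
      intro v hnd
      obtain ⟨k, c⟩ := p
      simp only [List.map_cons] at hnd
      have hk : k ∉ l.map Prod.fst := (List.nodup_cons.1 hnd).1
      have hnd' : (l.map Prod.fst).Nodup := (List.nodup_cons.1 hnd).2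
      rw [List.flatMap_cons, List.count_append]
      rw [PySem.Dict.getD_eq_get?_getD, PySem.Dict.get?_mk_cons]
      rw [ih v hnd']
      by_cases hv : k = v
      · subst hv
        have h0 : (PySem.Dict.mk l).get? k = none := by
          rw [PySem.Dict.get?_eq_none_iff_not_mem_keys]
          simpa [PySem.Dict.keys] using hk
        simp [h0, PySem.Dict.getD_eq_get?_getD]
      · simp [List.count_replicate, hv, PySem.Dict.getD_eq_get?_getD]

theorem pvCountNewB (d : PySem.Dict Int Int) (hnd : d.keys.Nodup) (v : Int) :
    (d.items.flatMap (fun p => List.replicate p.2.toNat p.1)).count v = (d.getD v 0).toNat := by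
  have h := pvFlatCount d.items v (by simpa [PySem.Dict.keys] using hnd)
  simpa using h

theorem pvDcA_count (a b : List Int) (v : Int) :
    (pvDeleteCommon a b).1.count v = a.count v - min (a.count v) (b.count v) ∧
    (pvDeleteCommon a b).2.count v = b.count v - min (a.count v) (b.count v) := by
  unfold pvDeleteCommon
  simp only [PySem.Dict.foldl_insert_getD_add_one_eq_counter]
  have h0 : ∀ w, 0 ≤ (PySem.Dict.counter b).getD w 0 := by
    intro w; rw [PySem.Dict.getD_counter]; positivity
  obtain ⟨h1, h2, h3, h4⟩ := pvLoopA v a (PySem.Dict.counter b) [] h0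
  have hnd : (a.foldl (fun (s : PySem.Dict Int Int × List Int) x =>
      if s.1.getD x 0 > 0 then (s.1.insert x (s.1.getD x 0 - 1), s.2)
      else (s.1, s.2 ++ [x])) (PySem.Dict.counter b, [])).1.keys.Nodup := by
    rw [h4]; exact PySem.Dict.nodup_keys_counter b
  constructor
  · rw [h2, PySem.Dict.getD_counter]
    simp
  · rw [PySem.List.foldl_append_eq_flatMap, List.nil_append,
        pvCountNewB _ hnd v, h1, PySem.Dict.getD_counter]
    omega

theorem pvDcB_count (a b : List Int) (v : Int) :
    (pvMergeDiff (PySem.List.sorted a (fun x => x) false) (PySem.List.sorted b (fun x => x) false)).1.count v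
      = a.count v - min (a.count v) (b.count v) ∧
    (pvMergeDiff (PySem.List.sorted a (fun x => x) false) (PySem.List.sorted b (fun x => x) false)).2.count v
      = b.count v - min (a.count v) (b.count v) := by
  have ha : (PySem.List.sorted a (fun x => x) false).Pairwise (· ≤ ·) :=
    PySem.List.sorted_pairwise a (fun x => x)
  have hb : (PySem.List.sorted b (fun x => x) false).Pairwise (· ≤ ·) :=
    PySem.List.sorted_pairwise b (fun x => x)
  have h := pvMergeDiff_count v _ _ ha hb
  rwa [(PySem.List.sorted_perm a (fun x => x) false).count_eq,
       (PySem.List.sorted_perm b (fun x => x) false).count_eq] at h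

theorem pvDc_perm (a b a' b' : List Int) (ha : a.Perm a') (hb : b.Perm b') :
    (pvDeleteCommon a b).1.Perm
      ((pvMergeDiff (PySem.List.sorted a' (fun x => x) false) (PySem.List.sorted b' (fun x => x) false)).1) ∧
    (pvDeleteCommon a b).2.Perm
      ((pvMergeDiff (PySem.List.sorted a' (fun x => x) false) (PySem.List.sorted b' (fun x => x) false)).2) := by
  constructor <;> rw [List.perm_iff_count] <;> intro v
  · rw [(pvDcA_count a b v).1, (pvDcB_count a' b' v).1, ha.count_eq, hb.count_eq]
  · rw [(pvDcA_count a b v).2, (pvDcB_count a' b' v).2, ha.count_eq, hb.count_eq]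

theorem pvReplace_eq : ∀ (arr : List Int) (res : List Int) (cnt : Int),
    arr.foldl (fun (s : List Int × Int) x =>
      if x > 9 then (s.1 ++ [((PySem.Int.toChars x).length : Int)], s.2 + 1)
      else (s.1 ++ [x], s.2)) (res, cnt)
    = (res ++ arr.map (fun x => if x > 9 then ((PySem.Int.toChars x).length : Int) else x),
       cnt + (arr.countP (fun x => decide (x > 9)) : Nat)) := by
  intro arr
  induction arr with
  | nil => simp
  | cons x t ih =>
      intro res cnt
      by_cases h : x > 9
      · simp [List.foldl_cons, h, ih]
        ring
      · simp [List.foldl_cons, h, ih]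

-- ===== VERDICT (by name: the statement is the Claim_ definition above) =====
theorem solve_spec : Claim_equal_solve := by
  intro a b _
  unfold Spec_solve solve solve_alt pvReplaceMultidigit
  simp only [pvReplace_eq, List.nil_append, PySem.List.foldl_if_add_one]
  obtain ⟨hp1, hp2⟩ := pvDc_perm a b a b (List.Perm.refl a) (List.Perm.refl b)
  obtain ⟨hq1, hq2⟩ := pvDc_perm _ _ _ _
    (hp1.map (fun x => if x > 9 then ((PySem.Int.toChars x).length : Int) else x))
    (hp2.map (fun x => if x > 9 then ((PySem.Int.toChars x).length : Int) else x))
  have e1 := hp1.countP_eq (fun x => decide (x > 9))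
  have e2 := hp2.countP_eq (fun x => decide (x > 9))
  have e3 := hq1.countP_eq (fun x => x != 1)
  have e4 := hq2.countP_eq (fun x => x != 1)
  simp only [List.countP_append]
  omega
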